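-- pv_equiv track=rewrite | github.com/tse-lao/social-api | main.py | tweetConversion
-- ===== SOURCE A (Python) =====
-- def tweetConversion(tweet):
--     tweet_words = []
--     for word in tweet.split(' '):
--         if word.startswith('@') and len(word) > 1:
--             word = '@user'
--         elif word.startswith('http'):
--             word = 'http'
--
--         tweet_words.append(word)
--     newTweet = " ".join(tweet_words)
--     return newTweet
-- ===== SOURCE B (Python) =====
-- def _norm(w):
--     if w.startswith('@') and len(w) > 1:
--         return '@user'
--     if w.startswith('http'):
--         return 'http'
--     return w
--
--
-- def tweetConversion(tweet):
--     # single character-level pass: build the result directly, flushing the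
--     # current token (normalized) at each space, instead of split/loop/join
--     res = ''
--     tok = ''
--     for ch in tweet:
--         if ch == ' ':
--             res += _norm(tok) + ' '
--             tok = ''
--         else:
--             tok += ch
--     return res + _norm(tok)
-- ===== Notes on version B (the rewrite author's own statement) =====
-- stated objective: alternative
-- what changed: Replaces the word-split/accumulate/join pipeline with a single character-level pass that builds the output directly, flushing and normalizing the current token at each space separator.
import Mathlib
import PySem

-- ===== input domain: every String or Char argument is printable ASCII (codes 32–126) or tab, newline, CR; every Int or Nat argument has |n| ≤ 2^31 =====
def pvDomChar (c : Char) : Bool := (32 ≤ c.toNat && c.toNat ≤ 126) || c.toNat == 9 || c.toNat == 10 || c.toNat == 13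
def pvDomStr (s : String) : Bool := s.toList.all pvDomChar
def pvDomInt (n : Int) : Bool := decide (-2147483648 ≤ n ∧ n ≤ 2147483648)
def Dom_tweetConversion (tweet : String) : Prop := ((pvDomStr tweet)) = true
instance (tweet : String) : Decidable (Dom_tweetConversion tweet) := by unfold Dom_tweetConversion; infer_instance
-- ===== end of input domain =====

-- B: one character-level pass that flushes the normalized token at each space (alternative decomposition; no speed claim)

-- ===== PORT A =====
-- A: split on ' ', normalize each word into an accumulator list, join with ' '
def tweetConversion (tweet : String) : String :=
  let words := PySem.Chars.splitOn tweet.toList [' ']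
  let tweet_words := words.foldl (fun acc word =>
    acc ++ [ if PySem.Chars.startswith word ['@'] && decide (1 < word.length) then "@user".toList
             else if PySem.Chars.startswith word "http".toList then "http".toList
             else word ]) []
  String.ofList (PySem.Chars.join [' '] tweet_words)

-- ===== PORT B =====
-- _norm of Source B
def normTok (w : List Char) : List Char :=
  if PySem.Chars.startswith w ['@'] && decide (1 < w.length) then "@user".toList
  else if PySem.Chars.startswith w "http".toList then "http".toList
  else w

def tweetConversion_alt (tweet : String) : String :=
  let st := tweet.toList.foldl
    (fun (st : List Char × List Char) ch =>
      if ch = ' ' then (st.1 ++ normTok st.2 ++ [' '], [])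
      else (st.1, st.2 ++ [ch])) ([], [])
  String.ofList (st.1 ++ normTok st.2)

-- ===== PRECONDITION & SPEC =====
def Spec_tweetConversion (tweet : String) (out : String) : Prop := out = tweetConversion_alt tweet
instance (tweet : String) (out : String) : Decidable (Spec_tweetConversion tweet out) := by unfold Spec_tweetConversion; infer_instance

-- ===== CLAIM (what is proved, stated in full; the proofs are below) =====
def Claim_equal_tweetConversion : Prop := ∀ (tweet : String), Dom_tweetConversion tweet → Spec_tweetConversion tweet (tweetConversion tweet)

-- ===== LEMMAS AND PROOFS =====

-- reference split on a single space
def spSplit : List Char → List (List Char)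
  | [] => [[]]
  | c :: t =>
    if c = ' ' then [] :: spSplit t
    else
      match spSplit t with
      | [] => [[c]]
      | p :: ps => (c :: p) :: ps

theorem spSplit_ne_nil (l : List Char) : spSplit l ≠ [] := by
  cases l with
  | nil => simp [spSplit]
  | cons c t =>
    simp only [spSplit]
    split
    · simp
    · cases h : spSplit t <;> simp

theorem splitOn_go_sp (l : List Char) : ∀ (fuel : Nat) (cur : List Char) (acc : List (List Char)),
    l.length < fuel →
    PySem.Chars.splitOn.go [' '] fuel l cur acc =
      acc.reverse ++ (match spSplit l with
        | [] => [cur.reverse]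
        | p :: ps => (cur.reverse ++ p) :: ps) := by
  induction l with
  | nil =>
    intro fuel cur acc h
    match fuel with
    | fuel + 1 => simp [PySem.Chars.splitOn.go, spSplit]
  | cons c t ih =>
    intro fuel cur acc h
    match fuel with
    | fuel + 1 =>
      rw [PySem.Chars.splitOn.go]
      by_cases hc : c = ' '
      · subst hc
        have : [' '].isPrefixOf (' ' :: t) = true := by simp [List.isPrefixOf]
        simp only [this, if_pos]
        rw [show List.drop [' '].length (' ' :: t) = t from rfl]
        rw [ih fuel [] (cur.reverse :: acc) (by simpa using h)]
        simp only [spSplit, reduceIte]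
        cases hs : spSplit t with
        | nil => exact absurd hs (spSplit_ne_nil t)
        | cons p ps => simp
      · have : [' '].isPrefixOf (c :: t) = false := by
          simp [List.isPrefixOf]
          exact Ne.symm hc
        simp only [this, Bool.false_eq_true, if_false]
        rw [ih fuel (c :: cur) acc (by simpa using h)]
        simp only [spSplit, if_neg hc]
        cases hs : spSplit t with
        | nil => exact absurd hs (spSplit_ne_nil t)
        | cons p ps => simp

theorem splitOn_sp (l : List Char) : PySem.Chars.splitOn l [' '] = spSplit l := by
  rw [PySem.Chars.splitOn, splitOn_go_sp l (l.length + 1) [] [] (by omega)]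
  cases hs : spSplit l with
  | nil => exact absurd hs (spSplit_ne_nil l)
  | cons p ps => simp

-- A's accumulator loop is a map
theorem foldl_append_map (f : List Char → List Char) :
    ∀ (ws : List (List Char)) (acc : List (List Char)),
    ws.foldl (fun acc w => acc ++ [f w]) acc = acc ++ ws.map f := by
  intro ws
  induction ws with
  | nil => simp
  | cons w ws ih => intro acc; simp [ih]

-- B's loop invariant, phrased against spSplit
theorem alt_invariant : ∀ (l res tok : List Char),
    (let st := l.foldl (fun (st : List Char × List Char) ch =>
        if ch = ' ' then (st.1 ++ normTok st.2 ++ [' '], [])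
        else (st.1, st.2 ++ [ch])) (res, tok)
     st.1 ++ normTok st.2) =
      res ++ PySem.Chars.join [' ']
        ((match spSplit l with
          | [] => [tok]
          | p :: ps => (tok ++ p) :: ps).map normTok) := by
  intro l
  induction l with
  | nil => intro res tok; simp [spSplit, PySem.Chars.join_singleton]
  | cons c t ih =>
    intro res tok
    by_cases hc : c = ' '
    · subst hc
      simp only [List.foldl_cons, reduceIte]
      rw [ih]
      simp only [spSplit, reduceIte]
      cases hs : spSplit t with
      | nil => exact absurd hs (spSplit_ne_nil t)
      | cons p ps =>
        simp only [List.map_cons]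
        rw [PySem.Chars.join_cons_cons]
        simp
    · simp only [List.foldl_cons, if_neg hc]
      rw [ih]
      simp only [spSplit, if_neg hc]
      cases hs : spSplit t with
      | nil => exact absurd hs (spSplit_ne_nil t)
      | cons p ps => simp

-- ===== VERDICT (by name: the statement is the Claim_ definition above) =====
theorem tweetConversion_spec : Claim_equal_tweetConversion := by
  intro tweet _
  unfold Spec_tweetConversion tweetConversion tweetConversion_alt
  simp only [← normTok.eq_def]
  rw [splitOn_sp, foldl_append_map normTok _ [], alt_invariant tweet.toList [] []]
  cases hs : spSplit tweet.toList with
  | nil => exact absurd hs (spSplit_ne_nil tweet.toList)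
  | cons p ps => simp [normTok]
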